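-- pv_equiv track=rewrite | github.com/google/seqio | seqio/deterministic/lazylist.py | _interleave_kth_element
-- ===== SOURCE A (Python) =====
-- from typing import Any, Callable, List, Optional, Sequence, Tuple, Union
--
-- def _interleave_counts_in_first_k(proportions: Sequence[int],
--                                   k: int) -> List[int]:
--   """Formula for interleaving infinite sequences with given proportions.
--
--   We are interleaving n infinite sequences (components) into one combined
--   sequence.
--
--   proportions (P) is a list of n integers, representing mixing proportions.
--
--   mix(P, k, i) represents the number of examples from component i
--   among the first k examples from the mixed sequence.  It is given by the
--   following formula:
--
--     mix(P, k, 0) = ceiling(k * P[0] / sum(P))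
--     mix(P, k, i>0) = mix(P[1:], k-mix(P, k, 0), i-1)
--
--   Element k of the mixed sequence is equal to element m from component i iff:
--
--     mix(P, k+1, i) == m+1  AND
--     mix(P, k, i) == m
--
--   _interleave_counts_in_first_k() computes the "mix" function described above.
--
--   _interleave_kth_element() maps from the index in the combined sequence to
--     identity of the component sequence and index in the component sequence.
--
--   Args:
--     proportions: a list/tuple of n integers (mixing proportions)
--     k: number of elements of the mixed sequence
--
--   Returns:
--     counts of how many elements from each component sequence are used.
--   """
--   orig_k = k
--   if not isinstance(k, int) or k < 0:
--     raise ValueError("k must be a non-negative integer, got %s" % k)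
--   for p in proportions:
--     if not isinstance(p, int) or p <= 0:
--       raise ValueError("proportions must be positive integers, got %s" %
--                        proportions)
--   sum_remaining = sum(proportions)
--   ret = []
--   for p in proportions:
--     num_not_from_first = (k * (sum_remaining - p)) // sum_remaining
--     ret.append(k - num_not_from_first)
--     k = num_not_from_first
--     sum_remaining -= p
--   assert k == 0
--   assert sum(ret) == orig_k
--   return ret
--
-- def _interleave_kth_element(proportions: Sequence[int],
--                             k: int) -> Tuple[int, int]:
--   """Formula for interleaving infinite sequences with given proportions.
--
--   We are interleaving n infinite sequences (components) into one combined
--   sequence.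
--
--   See the description in _interleave_counts_in_first_k() above.
--
--   Args:
--     proportions: a list/tuple of n integers (mixing proportions)
--     k: index in the mixed sequence
--
--   Returns:
--     which_component: an integer in [0, n), representing the component index
--     which_example: the index in the component sequence
--   """
--   new_counts = _interleave_counts_in_first_k(proportions, k + 1)
--   old_counts = _interleave_counts_in_first_k(proportions, k)
--   for which_component, (old_count,
--                         new_count) in enumerate(zip(old_counts, new_counts)):
--     if new_count > old_count:
--       return which_component, old_count
--   assert False
-- ===== SOURCE B (Python) =====
-- def _interleave_kth_element(proportions, k):
--   """Locate the k-th element of the interleaved sequence in a single pass.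
--
--   Keeps two running budgets (k and k+1) and a running sum of the remaining
--   proportions; the first component whose ceiling-count grows between the two
--   budgets owns the k-th element.  No intermediate count lists are built.
--   """
--   if not isinstance(k, int) or k < 0:
--     raise ValueError("k must be a non-negative integer, got %s" % k)
--   if not proportions:
--     raise ValueError("proportions must be non-empty")
--   total = 0
--   for p in proportions:
--     if not isinstance(p, int) or p <= 0:
--       raise ValueError("proportions must be positive integers, got %s" %
--                        proportions)
--     total += p
--   lo, hi = k, k + 1
--   for i, p in enumerate(proportions):
--     old_count = -(-lo * p // total)  # ceil(lo * p / total)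
--     new_count = -(-hi * p // total)  # ceil(hi * p / total)
--     if new_count > old_count:
--       return i, old_count
--     lo -= old_count
--     hi -= new_count
--     total -= p
--   raise AssertionError("unreachable: budgets always exhaust on some component")
-- ===== Notes on version B (the rewrite author's own statement) =====
-- stated objective: alternative
-- what changed: B replaces A's two full count-list constructions plus a zip scan with a single forward pass keeping two running budgets (k and k+1) and returning early at the first component whose ceiling count grows; Pre_ excludes exactly the inputs on which A raises (negative k, empty proportions, non-positive proportions), where B raises its own natural errors.
import Mathlib
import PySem

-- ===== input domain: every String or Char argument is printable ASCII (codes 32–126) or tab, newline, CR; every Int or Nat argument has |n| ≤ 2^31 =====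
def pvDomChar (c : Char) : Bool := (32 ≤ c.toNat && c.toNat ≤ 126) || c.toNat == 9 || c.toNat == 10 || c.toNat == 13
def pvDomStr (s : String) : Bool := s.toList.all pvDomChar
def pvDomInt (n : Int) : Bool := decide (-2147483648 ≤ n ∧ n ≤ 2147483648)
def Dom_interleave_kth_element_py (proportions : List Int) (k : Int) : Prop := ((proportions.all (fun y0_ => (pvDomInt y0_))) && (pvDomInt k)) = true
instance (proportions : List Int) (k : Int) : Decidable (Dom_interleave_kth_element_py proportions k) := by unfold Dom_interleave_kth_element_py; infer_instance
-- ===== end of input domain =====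

-- B fuses A's two count-list constructions and final scan into one forward pass with two
-- running budgets and an early return (no lists built); return-value equivalence on Pre_.

-- ===== PORT A =====
-- the 'for p in proportions' loop of _interleave_counts_in_first_k, appending k - num_not_from_first
-- and updating (k, sum_remaining); validation is excluded by Pre_ (it raises ValueError).
def pvCountsA (ps : List Int) (k s : Int) : List Int :=
  match ps with
  | [] => []
  | p :: rest =>
    let num_not_from_first := PySem.Int.floordiv (k * (s - p)) s
    (k - num_not_from_first) :: pvCountsA rest num_not_from_first (s - p)

-- the 'for which_component, (old_count, new_count) in enumerate(zip(...))' loop;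
-- the fallback (-1, -1) stands for the unreachable 'assert False' (outside Pre_ A raises).
def pvScanA (i : Int) (pairs : List (Int × Int)) : Int × Int :=
  match pairs with
  | [] => (-1, -1)
  | (o, n) :: rest => if n > o then (i, o) else pvScanA (i + 1) rest

def interleave_kth_element_py (proportions : List Int) (k : Int) : Int × Int :=
  let new_counts := pvCountsA proportions (k + 1) proportions.sum
  let old_counts := pvCountsA proportions k proportions.sum
  pvScanA 0 (old_counts.zip new_counts)

-- ===== PORT B =====
-- B's single 'for i, p in enumerate(proportions)' loop with budgets lo and hi;
-- the fallback (-1, -1) stands for B's unreachable final raise (outside Pre_).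
def pvLoopB (ps : List Int) (i lo hi total : Int) : Int × Int :=
  match ps with
  | [] => (-1, -1)
  | p :: rest =>
    let old_count := -(PySem.Int.floordiv (-(lo * p)) total)
    let new_count := -(PySem.Int.floordiv (-(hi * p)) total)
    if new_count > old_count then (i, old_count)
    else pvLoopB rest (i + 1) (lo - old_count) (hi - new_count) (total - p)

def interleave_kth_element_py_alt (proportions : List Int) (k : Int) : Int × Int :=
  let total := proportions.foldl (· + ·) 0
  pvLoopB proportions 0 k (k + 1) total

-- ===== PRECONDITION & SPEC =====
-- A raises outside Pre_: ValueError for k < 0 or a non-positive proportion, and an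
-- AssertionError ('assert False') or ZeroDivisionError when proportions is empty.
def Pre_interleave_kth_element_py (proportions : List Int) (k : Int) : Prop :=
  0 ≤ k ∧ proportions ≠ [] ∧ ∀ p ∈ proportions, 0 < p
instance (proportions : List Int) (k : Int) : Decidable (Pre_interleave_kth_element_py proportions k) := by unfold Pre_interleave_kth_element_py; infer_instance
def pvWitness_interleave_kth_element_py : List Int × Int := ([2, 1], 3)

def Spec_interleave_kth_element_py (proportions : List Int) (k : Int) (out : Int × Int) : Prop := out = interleave_kth_element_py_alt proportions k
instance (proportions : List Int) (k : Int) (out : Int × Int) : Decidable (Spec_interleave_kth_element_py proportions k out) := by unfold Spec_interleave_kth_element_py; infer_instance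

-- ===== CLAIM (what is proved, stated in full; the proofs are below) =====
def Claim_equal_interleave_kth_element_py : Prop := ∀ (proportions : List Int) (k : Int), Dom_interleave_kth_element_py proportions k → Pre_interleave_kth_element_py proportions k → Spec_interleave_kth_element_py proportions k (interleave_kth_element_py proportions k)

-- ===== LEMMAS AND PROOFS =====

-- A's 'k - (k*(s-p))//s' is B's ceiling count '-((-(k*p))//s)' (floor-division shift rule).
theorem pvCount_eq (k p s : Int) (hs : s ≠ 0) :
    k - PySem.Int.floordiv (k * (s - p)) s = -(PySem.Int.floordiv (-(k * p)) s) := by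
  have h : k * (s - p) = -(k * p) + k * s := by ring
  rw [h]
  simp only [PySem.Int.floordiv]
  rw [Int.add_mul_fdiv_right _ _ hs]
  ring

-- Core invariant: scanning the zipped count lists of A equals B's fused loop,
-- for any suffix of positive proportions with s = its sum.
theorem pvMain (ps : List Int) (i k kp : Int) (hpos : ∀ p ∈ ps, 0 < p) :
    pvScanA i ((pvCountsA ps k ps.sum).zip (pvCountsA ps kp ps.sum)) =
      pvLoopB ps i k kp ps.sum := by
  induction ps generalizing i k kp with
  | nil => rfl
  | cons p rest ih =>
    have hp : 0 < p := hpos p (List.mem_cons_self ..)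
    have hrest : ∀ q ∈ rest, 0 < q := fun q hq => hpos q (List.mem_cons_of_mem _ hq)
    have hrest_sum : 0 ≤ rest.sum := List.sum_nonneg (fun q hq => le_of_lt (hrest q hq))
    have hs : (p :: rest).sum ≠ 0 := by
      simp only [List.sum_cons]; omega
    simp only [pvCountsA, pvScanA, pvLoopB, List.zip_cons_cons, List.sum_cons]
    rw [pvCount_eq k p _ (by simpa using hs), pvCount_eq kp p _ (by simpa using hs)]
    have hsub : p + rest.sum - p = rest.sum := by ring
    split_ifs with h
    · rfl
    · rw [hsub]
      have hs' : p + rest.sum ≠ 0 := by omega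
      have c1 := pvCount_eq k p (p + rest.sum) hs'
      have c2 := pvCount_eq kp p (p + rest.sum) hs'
      rw [show k * (p + rest.sum - p) = k * rest.sum from by ring] at c1
      rw [show kp * (p + rest.sum - p) = kp * rest.sum from by ring] at c2
      have e1 : PySem.Int.floordiv (k * rest.sum) (p + rest.sum) =
          k - -(PySem.Int.floordiv (-(k * p)) (p + rest.sum)) := by omega
      have e2 : PySem.Int.floordiv (kp * rest.sum) (p + rest.sum) =
          kp - -(PySem.Int.floordiv (-(kp * p)) (p + rest.sum)) := by omega
      rw [e1, e2]
      exact ih (i + 1) _ _ hrest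

theorem pvFoldl_sum (ps : List Int) : ps.foldl (· + ·) 0 = ps.sum := by
  have h : ∀ (init : Int), ps.foldl (· + ·) init = init + ps.sum := by
    induction ps with
    | nil => simp
    | cons p rest ih => intro init; simp [List.foldl_cons, ih, List.sum_cons]; ring
  simpa using h 0

-- ===== VERDICT (by name: the statement is the Claim_ definition above) =====
theorem interleave_kth_element_py_spec : Claim_equal_interleave_kth_element_py := by
  intro proportions k _ hpre
  show pvScanA 0 ((pvCountsA proportions k proportions.sum).zip
      (pvCountsA proportions (k + 1) proportions.sum)) =
    pvLoopB proportions 0 k (k + 1) (proportions.foldl (· + ·) 0)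
  rw [pvFoldl_sum]
  exact pvMain proportions 0 k (k + 1) hpre.2.2
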